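-- pv_equiv track=rewrite | github.com/SergeKogan/SergeKogan | day1.py | extract_false_slots
-- ===== SOURCE A (Python) =====
-- def extract_false_slots(arr, found_slots=None, start_idx=0):
--     if found_slots is None:
--         found_slots = []
--     try:
--         first_false_idx = arr.index(False, start_idx)
--     except ValueError as e:
--         # не нашли незанятую минутку
--         return found_slots
--
--     # нашли незанятую минутку
--
--     try:
--         first_true_idx = arr.index(True, first_false_idx)
--
--     except ValueError as e:
--         # не нашли конец
--         new_slot = (first_false_idx, len(arr) - 1)
--         found_slots.append(new_slot)
--         return found_slots
--
--     # нашли конец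
--     new_slot = (first_false_idx, first_true_idx - 1)
--     found_slots.append(new_slot)
--     return extract_false_slots(arr, found_slots, first_true_idx)
-- ===== SOURCE B (Python) =====
-- def extract_false_slots(arr, found_slots=None, start_idx=0):
--     # Single forward scan with a run-start marker instead of repeated
--     # arr.index searches plus recursion.  Same append mutations on a
--     # caller-supplied found_slots list as the original.
--     if found_slots is None:
--         found_slots = []
--     n = len(arr)
--     i = start_idx if start_idx >= 0 else max(0, n + start_idx)
--     run_start = None
--     while i < n:
--         if run_start is None:
--             if arr[i] == False:
--                 run_start = i
--         else:
--             if arr[i] == True: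
--                 found_slots.append((run_start, i - 1))
--                 run_start = None
--         i += 1
--     if run_start is not None:
--         found_slots.append((run_start, n - 1))
--     return found_slots
-- ===== Notes on version B (the rewrite author's own statement) =====
-- stated objective: simpler
-- what changed: Replaced the recursive pair-of-arr.index searches with a single iterative forward scan that carries a run-start marker and appends each run as it closes.
import Mathlib
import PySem

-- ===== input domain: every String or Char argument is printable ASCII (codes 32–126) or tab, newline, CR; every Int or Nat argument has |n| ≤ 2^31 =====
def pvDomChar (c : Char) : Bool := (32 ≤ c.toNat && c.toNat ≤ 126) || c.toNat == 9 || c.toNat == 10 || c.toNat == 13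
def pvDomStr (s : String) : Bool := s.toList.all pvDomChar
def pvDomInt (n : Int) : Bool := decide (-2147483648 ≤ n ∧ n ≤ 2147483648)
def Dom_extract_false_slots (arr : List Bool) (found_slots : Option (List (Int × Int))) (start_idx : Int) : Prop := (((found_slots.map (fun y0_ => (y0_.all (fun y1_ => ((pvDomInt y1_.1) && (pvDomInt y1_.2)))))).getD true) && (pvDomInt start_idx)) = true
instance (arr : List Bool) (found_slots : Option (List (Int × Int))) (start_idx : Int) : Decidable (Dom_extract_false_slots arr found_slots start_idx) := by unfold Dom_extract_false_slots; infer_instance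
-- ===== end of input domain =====

-- B replaces A's recursive arr.index/arr.index pair with one forward scan carrying a
-- run-start marker (objective: simpler).  Both Pythons append to a caller-supplied
-- found_slots list identically; the equivalence proved here is about the return value.

-- ===== PORT A =====
-- arr.index(v, start): Python treats a negative start as len+start clamped at 0,
-- and raises ValueError (here: none) when no occurrence exists from there on.
def pyIndexFrom (xs : List Bool) (v : Bool) (s : Int) : Option Nat :=
  let e := (if s < 0 then s + xs.length else s).toNat
  (PySem.List.index? (xs.drop e) v).map (· + e)

def extract_false_slots_go (fuel : Nat) (arr : List Bool) (fs : List (Int × Int)) (start_idx : Int) : List (Int × Int) :=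
  match fuel with
  | 0 => fs  -- never reached: each recursive call strictly advances the search start
  | fuel + 1 =>
    match pyIndexFrom arr false start_idx with
    | none => fs
    | some f =>
      match pyIndexFrom arr true (f : Int) with
      | none => fs ++ [((f : Int), (arr.length : Int) - 1)]
      | some t => extract_false_slots_go fuel arr (fs ++ [((f : Int), (t : Int) - 1)]) (t : Int)

def extract_false_slots (arr : List Bool) (found_slots : Option (List (Int × Int))) (start_idx : Int) : List (Int × Int) :=
  extract_false_slots_go (arr.length + 1) arr (found_slots.getD []) start_idx

-- ===== PORT B =====
-- the while loop of Source B: i counts up, run carries the start of an open False run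
def goB (l : List Bool) (i : Int) (run : Option Int) (acc : List (Int × Int)) : List (Int × Int) :=
  match l, run with
  | [], none => acc
  | [], some s => acc ++ [(s, i - 1)]
  | b :: rest, none => goB rest (i + 1) (if b == false then some i else none) acc
  | b :: rest, some s =>
    if b == true then goB rest (i + 1) none (acc ++ [(s, i - 1)])
    else goB rest (i + 1) (some s) acc

def extract_false_slots_alt (arr : List Bool) (found_slots : Option (List (Int × Int))) (start_idx : Int) : List (Int × Int) :=
  let fs := found_slots.getD []
  let e : Nat := if 0 ≤ start_idx then start_idx.toNat else (start_idx + arr.length).toNat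
  goB (arr.drop e) (e : Int) none fs

-- ===== PRECONDITION & SPEC =====
def Spec_extract_false_slots (arr : List Bool) (found_slots : Option (List (Int × Int))) (start_idx : Int) (out : List (Int × Int)) : Prop := out = extract_false_slots_alt arr found_slots start_idx
instance (arr : List Bool) (found_slots : Option (List (Int × Int))) (start_idx : Int) (out : List (Int × Int)) : Decidable (Spec_extract_false_slots arr found_slots start_idx out) := by unfold Spec_extract_false_slots; infer_instance

-- ===== CLAIM (what is proved, stated in full; the proofs are below) =====
def Claim_equal_extract_false_slots : Prop := ∀ (arr : List Bool) (found_slots : Option (List (Int × Int))) (start_idx : Int), Dom_extract_false_slots arr found_slots start_idx → Spec_extract_false_slots arr found_slots start_idx (extract_false_slots arr found_slots start_idx)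

-- ===== LEMMAS AND PROOFS =====

-- goB skips a prefix without any False and stops
theorem goB_none_of_no_false (l : List Bool) (i : Int) (acc : List (Int × Int))
    (h : PySem.List.index? l false = none) : goB l i none acc = acc := by
  induction l generalizing i with
  | nil => rfl
  | cons b rest ih =>
    rw [PySem.List.index?_eq_none_iff] at h
    have hb : b = true := by cases b <;> simp_all
    subst hb
    simpa [goB] using ih (i + 1) (by rw [PySem.List.index?_eq_none_iff]; simp_all)

-- goB skips Trues up to the first False and opens a run there
theorem goB_skip_to_false (l : List Bool) (j : Nat) (i : Int) (acc : List (Int × Int))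
    (h : PySem.List.index? l false = some j) :
    goB l i none acc = goB (l.drop (j + 1)) (i + j + 1) (some (i + j)) acc := by
  induction l generalizing i j with
  | nil => simp [PySem.List.index?] at h
  | cons b rest ih =>
    cases b with
    | false =>
      rw [PySem.List.index?_cons_self] at h
      cases h
      simp [goB]
    | true =>
      rw [PySem.List.index?_cons_of_ne rest (by decide)] at h
      simp only [Option.map_eq_some_iff] at h
      obtain ⟨j', hj', rfl⟩ := h
      show goB rest (i + 1) none acc = _
      rw [ih j' (i + 1) hj']
      simp only [List.drop_succ_cons]
      push_cast
      ring_nf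

-- an open run with no True left closes at the end of the list
theorem goB_run_no_true (l : List Bool) (i s : Int) (acc : List (Int × Int))
    (h : PySem.List.index? l true = none) :
    goB l i (some s) acc = acc ++ [(s, i + l.length - 1)] := by
  induction l generalizing i with
  | nil => simp [goB]
  | cons b rest ih =>
    rw [PySem.List.index?_eq_none_iff] at h
    have hb : b = false := by cases b <;> simp_all
    subst hb
    show goB rest (i + 1) (some s) acc = _
    rw [ih (i + 1) (by rw [PySem.List.index?_eq_none_iff]; simp_all)]
    simp only [List.length_cons]
    push_cast
    ring_nf

-- an open run closes at the first True
theorem goB_run_to_true (l : List Bool) (j : Nat) (i s : Int) (acc : List (Int × Int))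
    (h : PySem.List.index? l true = some j) :
    goB l i (some s) acc = goB (l.drop (j + 1)) (i + j + 1) none (acc ++ [(s, i + j - 1)]) := by
  induction l generalizing i j acc with
  | nil => simp [PySem.List.index?] at h
  | cons b rest ih =>
    cases b with
    | true =>
      rw [PySem.List.index?_cons_self] at h
      cases h
      simp [goB]
    | false =>
      rw [PySem.List.index?_cons_of_ne rest (by decide)] at h
      simp only [Option.map_eq_some_iff] at h
      obtain ⟨j', hj', rfl⟩ := h
      show goB rest (i + 1) (some s) acc = _
      rw [ih j' (i + 1) acc hj']
      simp only [List.drop_succ_cons]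
      push_cast
      ring_nf

theorem pyIndexFrom_natCast (xs : List Bool) (v : Bool) (e : Nat) :
    pyIndexFrom xs v (e : Int) = (PySem.List.index? (xs.drop e) v).map (· + e) := by
  unfold pyIndexFrom
  rw [if_neg (by omega)]
  simp

-- main loop invariant: A's search loop started at a nonnegative index e equals B's scan from e
theorem main_aux (arr : List Bool) (N : Nat) :
    ∀ (e : Nat) (acc : List (Int × Int)), arr.length - e < N →
      extract_false_slots_go N arr acc (e : Int) = goB (arr.drop e) (e : Int) none acc := by
  induction N with
  | zero => intro e acc hN; omega
  | succ N ih =>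
    intro e acc hN
    simp only [extract_false_slots_go]
    rw [pyIndexFrom_natCast]
    cases hFalse : PySem.List.index? (arr.drop e) false with
    | none => simp [goB_none_of_no_false _ _ _ hFalse]
    | some j =>
      simp only [Option.map_some]
      obtain ⟨hjl, hjget, -⟩ := PySem.List.getElem_of_index?_eq_some hFalse
      rw [List.length_drop] at hjl
      have hf : j + e < arr.length := by omega
      have hdropf : arr.drop (j + e) = false :: arr.drop (j + e + 1) := by
        rw [List.drop_eq_getElem_cons hf]
        congr 1
        rw [← hjget, List.getElem_drop]
        congr 1
        omega
      rw [pyIndexFrom_natCast, hdropf,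
        PySem.List.index?_cons_of_ne _ (by decide)]
      rw [goB_skip_to_false _ _ _ _ hFalse]
      have hdd : (arr.drop e).drop (j + 1) = arr.drop (j + e + 1) := by
        rw [List.drop_drop]; congr 1; omega
      rw [hdd]
      cases hTrue : PySem.List.index? (arr.drop (j + e + 1)) true with
      | none =>
        simp only [Option.map_none]
        rw [goB_run_no_true _ _ _ _ hTrue]
        congr 1
        simp only [List.cons.injEq, Prod.mk.injEq, and_true, List.length_drop]
        have hc : ((arr.length - (j + e + 1) : Nat) : Int) = (arr.length : Int) - (j + e) - 1 := by omega
        rw [hc]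
        constructor <;> push_cast <;> ring
      | some j2 =>
        simp only [Option.map_some]
        obtain ⟨hj2l, hj2get, -⟩ := PySem.List.getElem_of_index?_eq_some hTrue
        rw [List.length_drop] at hj2l
        have ht : j2 + 1 + (j + e) < arr.length := by omega
        rw [goB_run_to_true _ _ _ _ _ hTrue]
        have hdd2 : (arr.drop (j + e + 1)).drop (j2 + 1) = arr.drop (j2 + 1 + (j + e) + 1) := by
          rw [List.drop_drop]; congr 1; omega
        rw [hdd2]
        have hIH := ih (j2 + 1 + (j + e)) (acc ++ [((↑(j + e) : Int), (↑(j2 + 1 + (j + e)) : Int) - 1)]) (by omega)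
        rw [hIH]
        have hdropt : arr.drop (j2 + 1 + (j + e)) = true :: arr.drop (j2 + 1 + (j + e) + 1) := by
          rw [List.drop_eq_getElem_cons ht]
          congr 1
          rw [← hj2get, List.getElem_drop]
          congr 1
          omega
        rw [hdropt]
        show goB (arr.drop (j2 + 1 + (j + e) + 1)) (↑(j2 + 1 + (j + e)) + 1)
            (if (true == false) = true then some (↑(j2 + 1 + (j + e)) : Int) else none)
            (acc ++ [((↑(j + e) : Int), (↑(j2 + 1 + (j + e)) : Int) - 1)]) = _
        simp only [show ((true == false) = true) = False by simp, if_false]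
        push_cast
        try ring_nf

-- A's search loop with an arbitrary start equals the same loop at the effective nonnegative index
theorem pyIndexFrom_eff (xs : List Bool) (v : Bool) (s : Int) :
    pyIndexFrom xs v s = pyIndexFrom xs v (((if s < 0 then s + xs.length else s).toNat : Nat) : Int) := by
  unfold pyIndexFrom
  rw [if_neg (show ¬ ((((((if s < 0 then s + (xs.length : Int) else s).toNat) : Nat)) : Int) < 0) by omega),
    Int.toNat_natCast]

theorem A_eff (N : Nat) (arr : List Bool) (acc : List (Int × Int)) (s : Int) :
    extract_false_slots_go N arr acc s
      = extract_false_slots_go N arr acc (((if s < 0 then s + arr.length else s).toNat : Nat) : Int) := by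
  cases N with
  | zero => rfl
  | succ N =>
    simp only [extract_false_slots_go]
    rw [← pyIndexFrom_eff]

-- ===== VERDICT (by name: the statement is the Claim_ definition above) =====
theorem extract_false_slots_spec : Claim_equal_extract_false_slots := by
  intro arr fs s _
  unfold Spec_extract_false_slots extract_false_slots_alt extract_false_slots
  rw [A_eff]
  rw [main_aux arr (arr.length + 1) _ _ (by omega)]
  have : (if s < 0 then s + (arr.length : Int) else s).toNat
       = if 0 ≤ s then s.toNat else (s + (arr.length : Int)).toNat := by
    split <;> split <;> omega
  rw [this]
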